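-- pv_equiv track=rewrite | github.com/sgtao/stapp-groq-models-chat | src/functions/GroqAPI.py | _add_supplement_property
-- ===== SOURCE A (Python) =====
-- def _add_supplement_property(data):
--     # append supplement
--     for item in data:
--         if "whisper" in item["id"]:
--             item["supplement"] = "Voice-to-Text"
--         elif "vision" in item["id"]:
--             item["supplement"] = "Vision-Enhanced"
--         elif "tool-use" in item["id"]:
--             item["supplement"] = "Tool-Enhanced"
--         else:
--             item["supplement"] = "Base-Language"
--
--     return data
-- ===== SOURCE B (Python) =====
-- _SUPPLEMENT_PASSES = [
--     ("tool-use", "Tool-Enhanced"),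
--     ("vision", "Vision-Enhanced"),
--     ("whisper", "Voice-to-Text"),
-- ]
--
--
-- def _add_supplement_property(data):
--     # Staged sweeps with overwrite semantics: first default every item, then one
--     # full sweep per keyword in REVERSE priority order; a later sweep overwrites
--     # an earlier one, so the highest-priority matching keyword wins in the end.
--     for item in data:
--         item["supplement"] = "Base-Language"
--     for sub, label in _SUPPLEMENT_PASSES:
--         for item in data:
--             if sub in item["id"]:
--                 item["supplement"] = label
--     return data
-- ===== Notes on version B (the rewrite author's own statement) =====
-- stated objective: alternative
-- what changed: Replaces the per-item if/elif decision with staged whole-list sweeps: a default pass sets every supplement to Base-Language, then one overwrite pass per keyword in reverse priority order, so the last (highest-priority) matching sweep wins.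
import Mathlib
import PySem

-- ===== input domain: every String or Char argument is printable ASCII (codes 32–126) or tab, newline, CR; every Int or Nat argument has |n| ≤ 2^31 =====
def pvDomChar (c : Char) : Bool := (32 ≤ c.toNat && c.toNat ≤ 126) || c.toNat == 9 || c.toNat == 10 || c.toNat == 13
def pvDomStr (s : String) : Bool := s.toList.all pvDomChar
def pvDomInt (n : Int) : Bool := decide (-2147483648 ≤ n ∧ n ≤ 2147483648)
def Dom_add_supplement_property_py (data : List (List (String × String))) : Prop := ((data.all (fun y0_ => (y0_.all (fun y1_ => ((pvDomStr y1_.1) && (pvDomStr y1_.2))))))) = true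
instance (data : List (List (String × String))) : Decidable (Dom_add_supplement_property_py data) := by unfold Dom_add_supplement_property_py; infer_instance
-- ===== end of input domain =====

-- B replaces A's per-item if/elif chain by staged whole-list sweeps: a default pass, then one
-- overwrite pass per keyword in reverse priority order (alternative decomposition; same cost).
-- A and B mutate the item dicts in place and return the same list; the equivalence proved here
-- is about the return value (the in-place effect coincides on inputs satisfying Pre_).


-- ===== PORT A =====
-- one loop iteration of A: the if/elif/else chain; item["id"] raising KeyError is excluded by Pre_,
-- the 'none' branch here is never reached inside Pre_.
def aStep (item : List (String × String)) : List (String × String) :=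
  let d := PySem.Dict.mk item
  match d.get? "id" with
  | none => item
  | some id =>
    if PySem.Str.isIn "whisper" id then (d.insert "supplement" "Voice-to-Text").items
    else if PySem.Str.isIn "vision" id then (d.insert "supplement" "Vision-Enhanced").items
    else if PySem.Str.isIn "tool-use" id then (d.insert "supplement" "Tool-Enhanced").items
    else (d.insert "supplement" "Base-Language").items

def add_supplement_property_py (data : List (List (String × String))) : List (List (String × String)) :=
  data.map aStep

-- ===== PORT B =====
def supplementPasses : List (String × String) :=
  [("tool-use", "Tool-Enhanced"), ("vision", "Vision-Enhanced"), ("whisper", "Voice-to-Text")]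

-- one overwrite sweep of B over the whole list for a single (substring, label) pair;
-- the 'none' branch (KeyError in Python) is excluded by Pre_.
def bPass (p : String × String) (data : List (List (String × String))) : List (List (String × String)) :=
  data.map (fun item =>
    match (PySem.Dict.mk item).get? "id" with
    | none => item
    | some id =>
      if PySem.Str.isIn p.1 id then ((PySem.Dict.mk item).insert "supplement" p.2).items else item)

def add_supplement_property_py_alt (data : List (List (String × String))) : List (List (String × String)) :=
  let defaulted := data.map (fun item => ((PySem.Dict.mk item).insert "supplement" "Base-Language").items)
  supplementPasses.foldl (fun acc p => bPass p acc) defaulted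

-- ===== PRECONDITION & SPEC =====
-- Pre_ excludes exactly the inputs where A raises KeyError: an item dict without an "id" key.
def Pre_add_supplement_property_py (data : List (List (String × String))) : Prop :=
  ∀ item ∈ data, (PySem.Dict.mk item).contains "id" = true
instance (data : List (List (String × String))) : Decidable (Pre_add_supplement_property_py data) := by unfold Pre_add_supplement_property_py; infer_instance
def pvWitness_add_supplement_property_py : (List (List (String × String))) :=
  [[("id", "llama-vision-7b")], [("id", "whisper-large"), ("owner", "x")]]

def Spec_add_supplement_property_py (data : List (List (String × String))) (out : List (List (String × String))) : Prop := out = add_supplement_property_py_alt data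
instance (data : List (List (String × String))) (out : List (List (String × String))) : Decidable (Spec_add_supplement_property_py data out) := by unfold Spec_add_supplement_property_py; infer_instance

-- ===== CLAIM (what is proved, stated in full; the proofs are below) =====
def Claim_equal_add_supplement_property_py : Prop := ∀ (data : List (List (String × String))), Dom_add_supplement_property_py data → Pre_add_supplement_property_py data → Spec_add_supplement_property_py data (add_supplement_property_py data)

-- ===== LEMMAS AND PROOFS =====
-- the three sweeps of B, composed item-wise, agree with A's single if/elif step
-- whenever the item has an "id" key.
lemma item_eq (item : List (String × String))
    (hid : (PySem.Dict.mk item).contains "id" = true) :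
    (bPass ("whisper", "Voice-to-Text")
      (bPass ("vision", "Vision-Enhanced")
        (bPass ("tool-use", "Tool-Enhanced")
          [((PySem.Dict.mk item).insert "supplement" "Base-Language").items]))) = [aStep item] := by
  have hsome : ∃ id, (PySem.Dict.mk item).get? "id" = some id := by
    cases h : (PySem.Dict.mk item).get? "id" with
    | none =>
      rw [PySem.Dict.contains_eq_isSome_get?, h] at hid
      simp at hid
    | some id => exact ⟨id, rfl⟩
  obtain ⟨id, hget⟩ := hsome
  have hget2 : ∀ (l : String),
      (PySem.Dict.mk (((PySem.Dict.mk item).insert "supplement" l).items)).get? "id"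
        = some id := by
    intro l
    show ((PySem.Dict.mk item).insert "supplement" l).get? "id" = some id
    rw [PySem.Dict.get?_insert]
    simp [hget]
  have hcollapse : ∀ (l l' : String),
      (PySem.Dict.mk (((PySem.Dict.mk item).insert "supplement" l).items)).insert "supplement" l'
        = (PySem.Dict.mk item).insert "supplement" l' := by
    intro l l'
    show ((PySem.Dict.mk item).insert "supplement" l).insert "supplement" l'
        = (PySem.Dict.mk item).insert "supplement" l'
    exact PySem.Dict.insert_insert_self _ _ _ _
  unfold bPass aStep
  cases h1 : PySem.Str.isIn "whisper" id <;>
    cases h2 : PySem.Str.isIn "vision" id <;>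
      cases h3 : PySem.Str.isIn "tool-use" id <;>
        simp only [List.map, hget, hget2, hcollapse, h1, h2, h3, if_true, if_false,
          Bool.false_eq_true]

-- a sweep of B distributes over list structure, so the whole composition does too
lemma bPass_cons (p : String × String) (x : List (String × String)) (xs : List (List (String × String))) :
    bPass p (x :: xs) = bPass p [x] ++ bPass p xs := by
  simp [bPass]

lemma bPass_append (p : String × String) (a b : List (List (String × String))) :
    bPass p (a ++ b) = bPass p a ++ bPass p b := by
  simp [bPass]

-- ===== VERDICT (by name: the statement is the Claim_ definition above) =====
theorem add_supplement_property_py_spec : Claim_equal_add_supplement_property_py := by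
  intro data hdom hpre
  clear hdom
  unfold Spec_add_supplement_property_py add_supplement_property_py add_supplement_property_py_alt
  show data.map aStep
      = (supplementPasses.foldl (fun acc p => bPass p acc)
          (data.map (fun item => ((PySem.Dict.mk item).insert "supplement" "Base-Language").items)))
  simp only [supplementPasses, List.foldl]
  induction data with
  | nil => rfl
  | cons x xs ih =>
    have hx : (PySem.Dict.mk x).contains "id" = true := hpre x (by simp)
    have hxs : ∀ item ∈ xs, (PySem.Dict.mk item).contains "id" = true :=
      fun item h => hpre item (by simp [h])
    have hcons : (x :: xs).map (fun item => ((PySem.Dict.mk item).insert "supplement" "Base-Language").items)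
        = ((PySem.Dict.mk x).insert "supplement" "Base-Language").items
          :: xs.map (fun item => ((PySem.Dict.mk item).insert "supplement" "Base-Language").items) := rfl
    rw [hcons, bPass_cons, bPass_append, bPass_append, item_eq x hx, ← ih hxs]
    rfl
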